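-- pv_equiv track=rewrite | github.com/CarlosBeiramar/LCC | 2ºAno/LA1/treino3/crescente.py | aux
-- ===== SOURCE A (Python) =====
-- def aux(indice,list1):
--     x=list1[indice]
--     ant=x
--     res=0
--     if x>=0:
--         for numbers in range(indice,len(list1)):
--             if(list1[numbers]>=x and list1[numbers]>=ant):
--                 ant=list1[numbers]
--                 res+=1
--     else:
--         for numbers in range(indice,len(list1)):
--             if(list1[numbers]<=x and list1[numbers]<=ant):
--                 ant=list1[numbers]
--                 res+=1
--
--     return res
-- ===== SOURCE B (Python) =====
-- def aux(indice, list1):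
--     x = list1[indice]
--     vals = [list1[i] for i in range(indice, len(list1))]
--     if x >= 0:
--         prefix, m = [], None
--         for v in vals:
--             m = v if m is None else max(m, v)
--             prefix.append(m)
--         return 1 + sum(1 for v, p in zip(vals[1:], prefix) if v >= p)
--     else:
--         prefix, m = [], None
--         for v in vals:
--             m = v if m is None else min(m, v)
--             prefix.append(m)
--         return 1 + sum(1 for v, p in zip(vals[1:], prefix) if v <= p)
-- ===== Notes on version B (the rewrite author's own statement) =====
-- stated objective: alternative
-- what changed: Replaces A's single stateful loop carrying (ant, res) and a conditional update by a stateless decomposition: materialize the visited values, build the list of running maxima/minima, then count positions that beat the previous running extreme (first position always counts).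
import Mathlib
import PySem

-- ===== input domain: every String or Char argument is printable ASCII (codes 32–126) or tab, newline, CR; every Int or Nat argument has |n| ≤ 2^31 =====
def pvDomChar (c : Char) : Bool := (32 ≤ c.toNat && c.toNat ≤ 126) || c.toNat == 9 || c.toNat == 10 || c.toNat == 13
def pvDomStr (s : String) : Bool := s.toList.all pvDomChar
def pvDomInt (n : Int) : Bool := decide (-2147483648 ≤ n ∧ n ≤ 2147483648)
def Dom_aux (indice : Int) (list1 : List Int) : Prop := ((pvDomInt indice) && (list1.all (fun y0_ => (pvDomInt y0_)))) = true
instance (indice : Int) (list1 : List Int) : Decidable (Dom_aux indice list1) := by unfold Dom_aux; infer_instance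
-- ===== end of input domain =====

-- B replaces A's stateful (ant, res) loop by a stateless decomposition: build the list of
-- running extremes, then count positions beating the previous extreme (objective: alternative).

-- ===== PORT A =====
def aux (indice : Int) (list1 : List Int) : Int :=
  let x := PySem.List.pyGetD list1 indice 0
  if x ≥ 0 then
    ((PySem.List.pyRange indice (PySem.List.len list1) 1).foldl
      (fun (st : Int × Int) numbers =>
        if PySem.List.pyGetD list1 numbers 0 ≥ x ∧ PySem.List.pyGetD list1 numbers 0 ≥ st.1
        then (PySem.List.pyGetD list1 numbers 0, st.2 + 1) else st) (x, 0)).2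
  else
    ((PySem.List.pyRange indice (PySem.List.len list1) 1).foldl
      (fun (st : Int × Int) numbers =>
        if PySem.List.pyGetD list1 numbers 0 ≤ x ∧ PySem.List.pyGetD list1 numbers 0 ≤ st.1
        then (PySem.List.pyGetD list1 numbers 0, st.2 + 1) else st) (x, 0)).2

-- ===== PORT B =====
def aux_alt (indice : Int) (list1 : List Int) : Int :=
  let x := PySem.List.pyGetD list1 indice 0
  let vals := (PySem.List.pyRange indice (PySem.List.len list1) 1).map
      (fun i => PySem.List.pyGetD list1 i 0)
  if x ≥ 0 then
    let pref := (vals.foldl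
      (fun (acc : List Int × Option Int) v =>
        let m := match acc.2 with | none => v | some m => max m v
        (acc.1 ++ [m], some m)) ([], none)).1
    1 + (((vals.drop 1).zip pref).countP (fun p => p.1 ≥ p.2) : Int)
  else
    let pref := (vals.foldl
      (fun (acc : List Int × Option Int) v =>
        let m := match acc.2 with | none => v | some m => min m v
        (acc.1 ++ [m], some m)) ([], none)).1
    1 + (((vals.drop 1).zip pref).countP (fun p => p.1 ≤ p.2) : Int)

-- ===== PRECONDITION & SPEC =====
-- Pre_ excludes exactly the inputs where list1[indice] raises IndexError in both Pythons.
def Pre_aux (indice : Int) (list1 : List Int) : Prop :=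
  PySem.Raise.InRange list1.length indice
instance (indice : Int) (list1 : List Int) : Decidable (Pre_aux indice list1) := by
  unfold Pre_aux; infer_instance
def pvWitness_aux : Int × List Int := (0, [3, 1, 4])

def Spec_aux (indice : Int) (list1 : List Int) (out : Int) : Prop := out = aux_alt indice list1
instance (indice : Int) (list1 : List Int) (out : Int) : Decidable (Spec_aux indice list1 out) := by unfold Spec_aux; infer_instance

-- ===== CLAIM (what is proved, stated in full; the proofs are below) =====
def Claim_equal_aux : Prop := ∀ (indice : Int) (list1 : List Int), Dom_aux indice list1 → Pre_aux indice list1 → Spec_aux indice list1 (aux indice list1)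

-- ===== LEMMAS AND PROOFS =====

/-- Count of left-to-right record positions (≥ running max), the common spec of both loops. -/
def recMax (best : Int) : List Int → Int
  | [] => 0
  | v :: vs => if v ≥ best then 1 + recMax v vs else recMax best vs

/-- Count of left-to-right record positions (≤ running min). -/
def recMin (best : Int) : List Int → Int
  | [] => 0
  | v :: vs => if v ≤ best then 1 + recMin v vs else recMin best vs

/-- Running maxima of a list, seeded with `m`. -/
def scanMax (m : Int) : List Int → List Int
  | [] => []
  | v :: vs => max m v :: scanMax (max m v) vs

def scanMin (m : Int) : List Int → List Int
  | [] => []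
  | v :: vs => min m v :: scanMin (min m v) vs

theorem foldA_max (list1 : List Int) (x : Int) :
    ∀ (idxs : List Int) (ant res : Int), x ≤ ant →
    (idxs.foldl (fun (st : Int × Int) numbers =>
        if PySem.List.pyGetD list1 numbers 0 ≥ x ∧ PySem.List.pyGetD list1 numbers 0 ≥ st.1
        then (PySem.List.pyGetD list1 numbers 0, st.2 + 1) else st) (ant, res)).2
      = res + recMax ant (idxs.map (fun i => PySem.List.pyGetD list1 i 0)) := by
  intro idxs
  induction idxs with
  | nil => intro ant res _; simp [recMax]
  | cons n idxs ih =>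
    intro ant res hx
    simp only [List.foldl_cons, List.map_cons, recMax]
    by_cases h : PySem.List.pyGetD list1 n 0 ≥ ant
    · rw [if_pos ⟨le_trans hx h, h⟩, if_pos h, ih _ (res + 1) (le_trans hx h)]; ring
    · rw [if_neg (fun hc => h hc.2), if_neg h, ih _ res hx]

theorem foldA_min (list1 : List Int) (x : Int) :
    ∀ (idxs : List Int) (ant res : Int), ant ≤ x →
    (idxs.foldl (fun (st : Int × Int) numbers =>
        if PySem.List.pyGetD list1 numbers 0 ≤ x ∧ PySem.List.pyGetD list1 numbers 0 ≤ st.1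
        then (PySem.List.pyGetD list1 numbers 0, st.2 + 1) else st) (ant, res)).2
      = res + recMin ant (idxs.map (fun i => PySem.List.pyGetD list1 i 0)) := by
  intro idxs
  induction idxs with
  | nil => intro ant res _; simp [recMin]
  | cons n idxs ih =>
    intro ant res hx
    simp only [List.foldl_cons, List.map_cons, recMin]
    by_cases h : PySem.List.pyGetD list1 n 0 ≤ ant
    · rw [if_pos ⟨le_trans h hx, h⟩, if_pos h, ih _ (res + 1) (le_trans h hx)]; ring
    · rw [if_neg (fun hc => h hc.2), if_neg h, ih _ res hx]

theorem foldB_some_max :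
    ∀ (vs : List Int) (l : List Int) (m : Int),
    (vs.foldl (fun (acc : List Int × Option Int) v =>
        (acc.1 ++ [match acc.2 with | none => v | some m => max m v],
         some (match acc.2 with | none => v | some m => max m v))) (l, some m)).1 = l ++ scanMax m vs := by
  intro vs
  induction vs with
  | nil => intro l m; simp [scanMax]
  | cons v vs ih =>
    intro l m
    simp only [List.foldl_cons, scanMax]
    rw [ih]; simp

theorem foldB_some_min :
    ∀ (vs : List Int) (l : List Int) (m : Int),
    (vs.foldl (fun (acc : List Int × Option Int) v =>
        (acc.1 ++ [match acc.2 with | none => v | some m => min m v],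
         some (match acc.2 with | none => v | some m => min m v))) (l, some m)).1 = l ++ scanMin m vs := by
  intro vs
  induction vs with
  | nil => intro l m; simp [scanMin]
  | cons v vs ih =>
    intro l m
    simp only [List.foldl_cons, scanMin]
    rw [ih]; simp

theorem foldB_pref_max (vs : List Int) (v0 : Int) :
    (((v0 :: vs).foldl (fun (acc : List Int × Option Int) v =>
        (acc.1 ++ [match acc.2 with | none => v | some m => max m v],
         some (match acc.2 with | none => v | some m => max m v))) ([], none)).1) = v0 :: scanMax v0 vs := by
  simp only [List.foldl_cons]
  simp only [List.nil_append]
  rw [foldB_some_max vs [v0] v0]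
  simp

theorem foldB_pref_min (vs : List Int) (v0 : Int) :
    (((v0 :: vs).foldl (fun (acc : List Int × Option Int) v =>
        (acc.1 ++ [match acc.2 with | none => v | some m => min m v],
         some (match acc.2 with | none => v | some m => min m v))) ([], none)).1) = v0 :: scanMin v0 vs := by
  simp only [List.foldl_cons]
  simp only [List.nil_append]
  rw [foldB_some_min vs [v0] v0]
  simp

theorem countB_max :
    ∀ (vs : List Int) (m : Int),
    ((vs.zip (m :: scanMax m vs)).countP (fun p => decide (p.1 ≥ p.2)) : Int)
      = recMax m vs := by
  intro vs
  induction vs with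
  | nil => intro m; simp [recMax]
  | cons v vs ih =>
    intro m
    simp only [scanMax, List.zip_cons_cons, List.countP_cons, recMax]
    by_cases h : v ≥ m
    · rw [max_eq_right h]
      simp only [if_pos h, decide_eq_true h]
      rw [← ih v]; push_cast; ring
    · rw [max_eq_left (le_of_not_ge h)]
      simp only [if_neg h, decide_eq_false h]
      rw [← ih m]; push_cast; ring

theorem countB_min :
    ∀ (vs : List Int) (m : Int),
    ((vs.zip (m :: scanMin m vs)).countP (fun p => decide (p.1 ≤ p.2)) : Int)
      = recMin m vs := by
  intro vs
  induction vs with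
  | nil => intro m; simp [recMin]
  | cons v vs ih =>
    intro m
    simp only [scanMin, List.zip_cons_cons, List.countP_cons, recMin]
    by_cases h : v ≤ m
    · rw [min_eq_right h]
      simp only [if_pos h, decide_eq_true h]
      rw [← ih v]; push_cast; ring
    · rw [min_eq_left (le_of_not_ge h)]
      simp only [if_neg h, decide_eq_false h]
      rw [← ih m]; push_cast; ring

-- ===== VERDICT (by name: the statement is the Claim_ definition above) =====
theorem aux_spec : Claim_equal_aux := by
  intro indice list1 _ hpre
  unfold Spec_aux aux aux_alt
  have hlt : indice < PySem.List.len list1 := by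
    unfold Pre_aux PySem.Raise.InRange at hpre
    simp only [PySem.List.len_eq]
    omega
  rw [PySem.List.pyRange_one_cons hlt]
  simp only [List.map_cons, List.drop_one, List.tail_cons]
  by_cases hx : PySem.List.pyGetD list1 indice 0 ≥ 0
  · simp only [if_pos hx]
    rw [foldA_max list1 _ _ _ 0 le_rfl]
    rw [foldB_pref_max]
    rw [countB_max]
    simp [recMax]
  · simp only [if_neg hx]
    rw [foldA_min list1 _ _ _ 0 le_rfl]
    rw [foldB_pref_min]
    rw [countB_min]
    simp [recMin]
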